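-- pv_equiv track=rewrite | github.com/poohpoom2002/OOD | Lab-3_3.py | process_game
-- ===== SOURCE A (Python) =====
-- class Stack:
--     def __init__(self):
--         self.items = []
--
--     def push(self, item):
--         self.items.append(item)
--
--     def pop(self):
--         if not self.isEmpty():
--             return self.items.pop()
--
--     def peek(self):
--         if not self.isEmpty():
--             return self.items[-1]
--
--     def isEmpty(self):
--         return self.size() == 0
--
--     def size(self):
--         return len(self.items)
--
--     def elements(self):
--         return self.items
--
--     def checkPop(self):
--         if self.items[-1] == self.items[-2] and self.items[-2] == self.items[-3]:
--             return True
--         return False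
--
-- def process_game(input_string):
--     stack = Stack()
--     temp = 0
--     combo_count = 0
--     for char in input_string:
--         stack.push(char)
--         if stack.size() >= 3:
--             if stack.checkPop():
--                 for i in range(3):
--                     stack.pop()
--                 combo_count += 1
--                 if temp == 2 :
--                     temp = 1
--                 else:
--                     temp += 1
--             else:
--                 if temp < 2:
--                     temp += 1
--                 else:
--                     temp = 0
--     return stack.size(), stack.elements(), combo_count
-- ===== SOURCE B (Python) =====
-- def process_game(input_string):
--     # run-length stack as a linked list of cons cells (char, count, rest); head = top
--     groups = None
--     combo_count = 0
--     for ch in input_string: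
--         if groups is not None and groups[0] == ch:
--             if groups[1] == 2:
--                 groups = groups[2]
--                 combo_count += 1
--             else:
--                 groups = (groups[0], groups[1] + 1, groups[2])
--         else:
--             groups = (ch, 1, groups)
--     # collect groups top-first, then expand bottom-to-top in original order
--     top_first = []
--     while groups is not None:
--         top_first.append((groups[0], groups[1]))
--         groups = groups[2]
--     elements = []
--     for g, n in reversed(top_first):
--         elements.extend([g] * n)
--     return len(elements), elements, combo_count
-- ===== Notes on version B (the rewrite author's own statement) =====
-- stated objective: alternative
-- what changed: Replaces the per-character Stack (push each char, inspect the last three, pop them one by one) with a run-length stack of (char, count) groups updated once per character, dropping the dead temp variable; elements are reconstructed by expanding the groups in order at the end.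
import Mathlib
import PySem

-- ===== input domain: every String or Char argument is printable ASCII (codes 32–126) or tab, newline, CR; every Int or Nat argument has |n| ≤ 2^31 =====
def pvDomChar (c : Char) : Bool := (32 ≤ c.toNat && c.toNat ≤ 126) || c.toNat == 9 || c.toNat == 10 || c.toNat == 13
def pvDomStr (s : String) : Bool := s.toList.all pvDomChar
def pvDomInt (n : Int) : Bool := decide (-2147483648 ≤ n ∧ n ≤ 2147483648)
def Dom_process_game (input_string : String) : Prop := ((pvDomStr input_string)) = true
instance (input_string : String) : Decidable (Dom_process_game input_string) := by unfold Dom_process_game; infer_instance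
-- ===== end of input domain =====

-- B replaces A's per-character Stack with a run-length stack of (char, count) groups,
-- one group operation per input character (objective: idiomatic/alternative data structure).

-- ===== PORT A =====
-- Stack.checkPop: items[-1] == items[-2] and items[-2] == items[-3]
def pvCheckPop (items : List String) : Bool :=
  (PySem.List.pyGet? items (-1) == PySem.List.pyGet? items (-2)) &&
  (PySem.List.pyGet? items (-2) == PySem.List.pyGet? items (-3))

-- one iteration of A's for-loop; state = (stack.items, temp, combo_count)
def pvStepA (st : List String × Int × Int) (c : Char) : List String × Int × Int :=
  let items := st.1 ++ [String.singleton c]          -- stack.push(char)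
  if 3 ≤ items.length then                          -- stack.size() >= 3
    if pvCheckPop items then
      -- for i in range(3): stack.pop()  (pop drops the last element; items are nonempty here)
      (((List.range 3).foldl (fun acc _ => acc.dropLast) items),
       (if st.2.1 = 2 then 1 else st.2.1 + 1),      -- temp update on the combo branch
       st.2.2 + 1)                                   -- combo_count += 1
    else
      (items, (if st.2.1 < 2 then st.2.1 + 1 else 0), st.2.2)
  else (items, st.2)

def process_game (input_string : String) : Int × List String × Int :=
  let st := input_string.toList.foldl pvStepA ([], 0, 0)
  ((st.1.length : Int), st.1, st.2.2)

-- ===== PORT B =====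
-- one iteration of B's for-loop; state = (groups (head = top), combo_count)
def pvStepB (st : List (String × Int) × Int) (c : Char) : List (String × Int) × Int :=
  match st.1 with
  | (g, n) :: rest =>
    if g = String.singleton c then
      if n = 2 then (rest, st.2 + 1)
      else ((g, n + 1) :: rest, st.2)
    else ((String.singleton c, 1) :: (g, n) :: rest, st.2)
  | [] => ((String.singleton c, 1) :: [], st.2)

-- elements reconstruction: for g, n in reversed(groups): elements.extend([g] * n)
def pvExpand (gs : List (String × Int)) : List String :=
  gs.reverse.foldl (fun acc p => acc ++ List.replicate p.2.toNat p.1) []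

def process_game_alt (input_string : String) : Int × List String × Int :=
  let st := input_string.toList.foldl pvStepB ([], 0)
  let elements := pvExpand st.1
  ((elements.length : Int), elements, st.2)

-- ===== PRECONDITION & SPEC =====
def Spec_process_game (input_string : String) (out : Int × List String × Int) : Prop := out = process_game_alt input_string
instance (input_string : String) (out : Int × List String × Int) : Decidable (Spec_process_game input_string out) := by unfold Spec_process_game; infer_instance

-- ===== CLAIM (what is proved, stated in full; the proofs are below) =====
def Claim_equal_process_game : Prop := ∀ (input_string : String), Dom_process_game input_string → Spec_process_game input_string (process_game input_string)

-- ===== LEMMAS AND PROOFS =====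

-- invariant of B's run-length stack: each count is 1 or 2, adjacent groups have distinct chars
def pvInv : List (String × Int) → Prop
  | [] => True
  | (g, n) :: rest => (n = 1 ∨ n = 2) ∧ (∀ p ∈ rest.head?, (p : String × Int).1 ≠ g) ∧ pvInv rest

lemma pvExpand_nil : pvExpand [] = [] := rfl

lemma pvExpand_cons (g : String) (n : Int) (rest : List (String × Int)) :
    pvExpand ((g, n) :: rest) = pvExpand rest ++ List.replicate n.toNat g := by
  simp [pvExpand, List.foldl_append]

lemma pvCheckPop_append3 (l : List String) (a b c : String) :
    pvCheckPop (l ++ [a, b, c]) = ((c == b) && (b == a)) := by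
  have h : (l ++ [a, b, c]).length = l.length + 3 := by simp
  unfold pvCheckPop
  rw [PySem.List.pyGet?_neg_ofNat _ 1 (by omega) (by omega),
      PySem.List.pyGet?_neg_ofNat _ 2 (by omega) (by omega),
      PySem.List.pyGet?_neg_ofNat _ 3 (by omega) (by omega)]
  have h1 : (l ++ [a, b, c]).length - 1 = l.length + 2 := by omega
  have h2 : (l ++ [a, b, c]).length - 2 = l.length + 1 := by omega
  have h3 : (l ++ [a, b, c]).length - 3 = l.length := by omega
  rw [h1, h2, h3]
  simp

lemma pvCheckPop_append2_ne (l : List String) (b c : String) (h : b ≠ c) :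
    pvCheckPop (l ++ [b, c]) = false := by
  have hlen : (l ++ [b, c]).length = l.length + 2 := by simp
  unfold pvCheckPop
  rw [PySem.List.pyGet?_neg_ofNat _ 1 (by omega) (by omega),
      PySem.List.pyGet?_neg_ofNat _ 2 (by omega) (by omega)]
  have h1 : (l ++ [b, c]).length - 1 = l.length + 1 := by omega
  have h2 : (l ++ [b, c]).length - 2 = l.length := by omega
  rw [h1, h2]
  simp [Ne.symm h]

lemma pvDrop3 (l : List String) (a b c : String) :
    (List.range 3).foldl (fun acc _ => acc.dropLast) (l ++ [a, b, c]) = l := by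
  have : (List.range 3) = [0, 1, 2] := by decide
  rw [this]
  simp [List.foldl]

-- one step of A on the expansion of a well-formed group stack simulates one step of B
lemma pvStep_sim (gs : List (String × Int)) (t k : Int) (c : Char) (h : pvInv gs) :
    (pvStepA (pvExpand gs, t, k) c).1 = pvExpand (pvStepB (gs, k) c).1 ∧
    (pvStepA (pvExpand gs, t, k) c).2.2 = (pvStepB (gs, k) c).2 ∧
    pvInv (pvStepB (gs, k) c).1 := by
  match gs with
  | [] =>
    refine ⟨?_, rfl, ?_⟩
    · simp [pvStepA, pvStepB, pvExpand_cons, pvExpand_nil]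
    · exact ⟨Or.inl rfl, by simp, trivial⟩
  | (g, n) :: rest =>
    obtain ⟨hn, hne, hrest⟩ := h
    by_cases hc : g = String.singleton c
    · rcases hn with hn | hn
      · -- count 1 → becomes count 2, no collapse
        subst hn
        have hB : pvStepB ((g, 1) :: rest, k) c = ((g, 2) :: rest, k) := by
          simp [pvStepB, hc]
        have hitems : pvExpand ((g, (1:Int)) :: rest) ++ [String.singleton c]
            = pvExpand rest ++ [g, g] := by
          rw [← hc, pvExpand_cons]; simp
        have hA : (pvStepA (pvExpand ((g, (1:Int)) :: rest), t, k) c).1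
              = pvExpand rest ++ [g, g] ∧
            (pvStepA (pvExpand ((g, (1:Int)) :: rest), t, k) c).2.2 = k := by
          match hr : rest with
          | [] =>
            constructor <;> simp [pvStepA, hitems, pvExpand_nil]
          | (g', n') :: rest' =>
            have hg' : g' ≠ g := hne (g', n') rfl
            obtain ⟨hn', _, _⟩ := hrest
            have : ∃ l, pvExpand ((g', n') :: rest') = l ++ [g'] := by
              rcases hn' with h' | h' <;> subst h'
              · exact ⟨pvExpand rest', by rw [pvExpand_cons]; rfl⟩
              · exact ⟨pvExpand rest' ++ [g'], by rw [pvExpand_cons]; simp [List.replicate]⟩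
            obtain ⟨l, hl⟩ := this
            have h3 : pvExpand ((g', n') :: rest') ++ [g, g] = l ++ [g', g, g] := by
              rw [hl]; simp
            have hcp : pvCheckPop (l ++ [g', g, g]) = false := by
              rw [pvCheckPop_append3]; simp [hg'.symm]
            constructor <;>
              simp [pvStepA, hitems, h3, hcp]
        refine ⟨?_, ?_, ?_⟩
        · rw [hA.1, hB]; rw [pvExpand_cons]; simp [List.replicate]
        · rw [hA.2, hB]
        · rw [hB]; exact ⟨Or.inr rfl, hne, hrest⟩
      · -- count 2 → collapse
        subst hn
        have hB : pvStepB ((g, 2) :: rest, k) c = (rest, k + 1) := by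
          simp [pvStepB, hc]
        have hitems : pvExpand ((g, (2:Int)) :: rest) ++ [String.singleton c]
            = pvExpand rest ++ [g, g, g] := by
          rw [← hc, pvExpand_cons]; simp [List.replicate]
        have hcp : pvCheckPop (pvExpand rest ++ [g, g, g]) = true := by
          rw [pvCheckPop_append3]; simp
        have hdr := pvDrop3 (pvExpand rest) g g g
        refine ⟨?_, ?_, ?_⟩
        · rw [hB]; simp [pvStepA, hitems, hcp, hdr]
        · rw [hB]; simp [pvStepA, hitems, hcp]
        · rw [hB]; exact hrest
    · -- different char → new group pushed, no collapse
      have hB : pvStepB ((g, n) :: rest, k) c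
          = ((String.singleton c, 1) :: (g, n) :: rest, k) := by
        simp [pvStepB, hc]
      have hA : (pvStepA (pvExpand ((g, n) :: rest), t, k) c).1
            = pvExpand ((g, n) :: rest) ++ [String.singleton c] ∧
          (pvStepA (pvExpand ((g, n) :: rest), t, k) c).2.2 = k := by
        have : ∃ l, pvExpand ((g, n) :: rest) = l ++ [g] := by
          rcases hn with h' | h' <;> subst h'
          · exact ⟨pvExpand rest, by rw [pvExpand_cons]; rfl⟩
          · exact ⟨pvExpand rest ++ [g], by rw [pvExpand_cons]; simp [List.replicate]⟩
        obtain ⟨l, hl⟩ := this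
        have hcp : pvCheckPop (pvExpand ((g, n) :: rest) ++ [String.singleton c]) = false := by
          rw [hl, show l ++ [g] ++ [String.singleton c] = l ++ [g, String.singleton c] by simp]
          exact pvCheckPop_append2_ne l _ _ (fun e => hc e)
        constructor <;> (simp only [pvStepA, hcp]; split <;> simp)
      refine ⟨?_, ?_, ?_⟩
      · rw [hA.1, hB]; simp [pvExpand_cons]
      · rw [hA.2, hB]
      · rw [hB]
        refine ⟨Or.inl rfl, ?_, hn, hne, hrest⟩
        intro p hp
        simp at hp
        subst hp
        exact hc

-- fold simulation
lemma pvFold_sim (cs : List Char) : ∀ (gs : List (String × Int)) (t k : Int), pvInv gs →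
    (cs.foldl pvStepA (pvExpand gs, t, k)).1 = pvExpand (cs.foldl pvStepB (gs, k)).1 ∧
    (cs.foldl pvStepA (pvExpand gs, t, k)).2.2 = (cs.foldl pvStepB (gs, k)).2 := by
  induction cs with
  | nil => intro gs t k _; exact ⟨rfl, rfl⟩
  | cons c cs ih =>
    intro gs t k h
    obtain ⟨h1, h2, h3⟩ := pvStep_sim gs t k c h
    have hAeq : pvStepA (pvExpand gs, t, k) c
        = (pvExpand (pvStepB (gs, k) c).1, (pvStepA (pvExpand gs, t, k) c).2.1,
           (pvStepB (gs, k) c).2) := by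
      rw [← h1, ← h2]
    have := ih (pvStepB (gs, k) c).1 (pvStepA (pvExpand gs, t, k) c).2.1 (pvStepB (gs, k) c).2 h3
    simp only [List.foldl_cons]
    rw [hAeq]
    exact this

-- ===== VERDICT (by name: the statement is the Claim_ definition above) =====
theorem process_game_spec : Claim_equal_process_game := by
  intro s _
  unfold Spec_process_game process_game process_game_alt
  obtain ⟨h1, h2⟩ := pvFold_sim s.toList [] 0 0 trivial
  simp only [pvExpand_nil] at h1 h2
  simp [h1, h2]
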